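-- pv_equiv track=rewrite | github.com/IAnanevich/tms-python-py43 | src/Additional_tasks/task_5.py | count_increasing_sections
-- ===== SOURCE A (Python) =====
-- from typing import List
--
-- def count_increasing_sections(arr: List[int]) -> int:
--     """
--     Count the number of increasing sections in the integer array.
--
--     Args:
--         arr (List[int]): The list of integers.
--
--     Returns:
--         int: The number of increasing sections.
--     """
--     count = 0
--     increasing = False
--
--     for i in range(1, len(arr)):
--         if arr[i] > arr[i - 1]:
--             if not increasing:
--                 increasing = True
--                 count += 1
--         else:
--             increasing = False
--
--     return count
-- ===== SOURCE B (Python) =====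
-- from typing import List
--
-- def count_increasing_sections(arr: List[int]) -> int:
--     # Combinatorial identity: each maximal increasing run of length k >= 2
--     # contributes (k-1) rising pairs and (k-2) rising triples, so
--     # #runs = #rising pairs - #rising triples.
--     rises = sum(a < b for a, b in zip(arr, arr[1:]))
--     chains = sum(a < b < c for a, b, c in zip(arr, arr[1:], arr[2:]))
--     return rises - chains
-- ===== Notes on version B (the rewrite author's own statement) =====
-- stated objective: alternative
-- what changed: Replaces A's stateful sequential scan (run-start detection with a flag) by the combinatorial identity #runs = #rising adjacent pairs - #rising adjacent triples, computed as two independent window counts.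
import Mathlib
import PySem

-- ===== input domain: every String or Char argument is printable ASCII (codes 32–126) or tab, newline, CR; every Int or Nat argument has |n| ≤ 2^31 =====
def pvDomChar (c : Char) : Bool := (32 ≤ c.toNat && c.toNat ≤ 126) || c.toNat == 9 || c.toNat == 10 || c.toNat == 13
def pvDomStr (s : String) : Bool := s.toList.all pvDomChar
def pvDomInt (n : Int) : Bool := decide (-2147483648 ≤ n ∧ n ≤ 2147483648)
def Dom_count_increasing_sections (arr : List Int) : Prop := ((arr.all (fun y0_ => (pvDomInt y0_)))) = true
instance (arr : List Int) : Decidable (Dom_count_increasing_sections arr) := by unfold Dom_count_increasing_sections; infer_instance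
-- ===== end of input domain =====

-- ===== PORT A =====
def count_increasing_sections (arr : List Int) : Int :=
  let st := (PySem.List.pyRange 1 (arr.length : Int) 1).foldl
    (fun (s : Int × Bool) i =>
      if PySem.List.pyGetD arr (i - 1) 0 < PySem.List.pyGetD arr i 0 then
        if s.2 = false then (s.1 + 1, true) else s
      else (s.1, false))
    (0, false)
  st.1

-- ===== PORT B =====
-- B uses the identity: #increasing runs = #rising adjacent pairs - #rising adjacent triples.
def count_increasing_sections_alt (arr : List Int) : Int :=
  let t1 := PySem.List.slice arr (some 1) none
  let t2 := PySem.List.slice arr (some 2) none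
  let rises : Int := ((arr.zip t1).countP (fun p => decide (p.1 < p.2)) : Int)
  let chains : Int := (((arr.zip t1).zip t2).countP
    (fun p => decide (p.1.1 < p.1.2) && decide (p.1.2 < p.2)) : Int)
  rises - chains

-- ===== PRECONDITION & SPEC =====
def Spec_count_increasing_sections (arr : List Int) (out : Int) : Prop := out = count_increasing_sections_alt arr
instance (arr : List Int) (out : Int) : Decidable (Spec_count_increasing_sections arr out) := by unfold Spec_count_increasing_sections; infer_instance

-- ===== CLAIM (what is proved, stated in full; the proofs are below) =====
def Claim_equal_count_increasing_sections : Prop := ∀ (arr : List Int), Dom_count_increasing_sections arr → Spec_count_increasing_sections arr (count_increasing_sections arr)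

-- ===== LEMMAS AND PROOFS =====

-- the pair (arr[i-1], arr[i]) read by A's loop, as a function of the index
def pvPair (arr : List Int) (i : Int) : Int × Int :=
  (PySem.List.pyGetD arr (i - 1) 0, PySem.List.pyGetD arr i 0)

lemma pvMapPair (arr : List Int) :
    (PySem.List.pyRange 1 (arr.length : Int) 1).map (pvPair arr) = arr.zip arr.tail := by
  apply List.ext_getElem
  · simp [PySem.List.length_pyRange_one, List.length_tail]
  · intro k hk1 hk2
    simp only [List.getElem_map, PySem.List.getElem_pyRange_one, pvPair]
    have hlen : k + 1 < arr.length := by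
      simp [PySem.List.length_pyRange_one] at hk1; omega
    have h1 : (1 : Int) + (k : Int) - 1 = ((k : Nat) : Int) := by ring
    have h2 : (1 : Int) + (k : Int) = (((k + 1 : Nat)) : Int) := by push_cast; ring
    rw [h1, h2, PySem.List.pyGetD_natCast, PySem.List.pyGetD_natCast]
    simp [List.getElem_zip, List.getElem_tail, List.getD_eq_getElem?_getD,
      List.getElem?_eq_getElem (by omega : k < arr.length),
      List.getElem?_eq_getElem hlen]

-- one step of A's loop, in normal form on the boolean flag
def pvStep (s : Int × Bool) (g : Bool) : Int × Bool :=
  if g then (if s.2 = false then (s.1 + 1, true) else s) else (s.1, false)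

-- number of True flags
def pvT (gs : List Bool) : Int := (gs.countP id : Int)

-- number of adjacent (True, True) pairs in prev :: gs
def pvP (prev : Bool) (gs : List Bool) : Int :=
  (((prev :: gs).zip gs).countP (fun p => p.1 && p.2) : Int)

lemma pvFoldTP (gs : List Bool) (c : Int) (inc : Bool) :
    (gs.foldl pvStep (c, inc)).1 = c + pvT gs - pvP inc gs := by
  induction gs generalizing c inc with
  | nil => simp [pvT, pvP]
  | cons g rest ih =>
    have hz : (inc :: g :: rest).zip (g :: rest) = (inc, g) :: (g :: rest).zip rest := rfl
    cases g <;> cases inc <;>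
      simp [pvStep, pvT, pvP, hz, ih] <;> ring

-- the flag list B reasons about: pairwise strict-increase of arr
def pvGaps (arr : List Int) : List Bool :=
  (arr.zip arr.tail).map (fun p => decide (p.1 < p.2))

lemma pvGaps_cons (a b : Int) (r : List Int) :
    pvGaps (a :: b :: r) = decide (a < b) :: pvGaps (b :: r) := rfl

-- B's triple count equals the adjacent-True-pair count of the gaps list
lemma pvChains_eq (arr : List Int) :
    (((arr.zip arr.tail).zip arr.tail.tail).countP
        (fun p => decide (p.1.1 < p.1.2) && decide (p.1.2 < p.2)) : Int)
      = pvP false (pvGaps arr) := by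
  induction arr with
  | nil => simp [pvGaps, pvP]
  | cons a rest ih =>
    cases rest with
    | nil => simp [pvGaps, pvP]
    | cons b rest2 =>
      cases rest2 with
      | nil => simp [pvGaps, pvP]
      | cons c rest3 =>
        have h := ih
        simp only [pvGaps_cons, pvP, List.tail_cons, List.zip_cons_cons,
          List.countP_cons] at h ⊢
        push_cast
        push_cast at h
        rw [h]
        simp

-- B's pair count equals the True count of the gaps list
lemma pvRises_eq (arr : List Int) :
    ((arr.zip arr.tail).countP (fun p => decide (p.1 < p.2)) : Int) = pvT (pvGaps arr) := by
  simp [pvGaps, pvT, List.countP_map]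

theorem count_increasing_sections_spec : Claim_equal_count_increasing_sections := by
  intro arr _
  unfold Spec_count_increasing_sections count_increasing_sections count_increasing_sections_alt
  have h2 : PySem.List.slice arr (some 2) none = arr.tail.tail := by
    rw [show (2:Int) = ((2:Nat):Int) by norm_num, PySem.List.slice_from_natCast]
    cases arr with
    | nil => rfl
    | cons a r => cases r <;> rfl
  rw [PySem.List.slice_from_one, h2]
  have hfold :
      (PySem.List.pyRange 1 (arr.length : Int) 1).foldl
        (fun (s : Int × Bool) i =>
          if PySem.List.pyGetD arr (i - 1) 0 < PySem.List.pyGetD arr i 0 then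
            if s.2 = false then (s.1 + 1, true) else s
          else (s.1, false)) (0, false)
      = (pvGaps arr).foldl pvStep (0, false) := by
    unfold pvGaps
    rw [← pvMapPair, List.foldl_map, List.foldl_map]
    apply PySem.List.foldl_congr_mem
    intro s i _
    by_cases h : PySem.List.pyGetD arr (i - 1) 0 < PySem.List.pyGetD arr i 0 <;>
      simp [pvPair, pvStep, h]
  simp only [hfold, pvFoldTP, pvRises_eq, pvChains_eq, zero_add]
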